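-- pv_equiv track=rewrite | github.com/disciuser/homework_koshulko | hw2_koshulko.py | list_parity_unparity
-- ===== SOURCE A (Python) =====
-- def list_parity_unparity(list_number):
-- 	new_list = sorted(list_number)
-- 	new_list_parity = []
-- 	new_list_unparity = []
-- 	for go_list in range(0,len(new_list)):
-- 		if new_list[go_list]%2==0:
-- 			new_list_parity.append(new_list[go_list])
-- 		elif new_list[go_list]%2!=0:
-- 			new_list_unparity.append(new_list[go_list])
-- 	new_list_parity.reverse()
-- 	new_list = new_list_unparity + new_list_parity
-- 	return new_list
-- ===== SOURCE B (Python) =====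
-- def list_parity_unparity(list_number):
-- 	odds = sorted(x for x in list_number if x % 2 != 0)
-- 	evens = sorted((x for x in list_number if x % 2 == 0), reverse=True)
-- 	return odds + evens
-- ===== Notes on version B (the rewrite author's own statement) =====
-- stated objective: simpler
-- what changed: B reverses A's order of operations: instead of one global sort followed by an index loop that partitions into evens/odds and a reverse, B partitions first and sorts each part directly (odds ascending, evens descending) and concatenates.
import Mathlib
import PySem

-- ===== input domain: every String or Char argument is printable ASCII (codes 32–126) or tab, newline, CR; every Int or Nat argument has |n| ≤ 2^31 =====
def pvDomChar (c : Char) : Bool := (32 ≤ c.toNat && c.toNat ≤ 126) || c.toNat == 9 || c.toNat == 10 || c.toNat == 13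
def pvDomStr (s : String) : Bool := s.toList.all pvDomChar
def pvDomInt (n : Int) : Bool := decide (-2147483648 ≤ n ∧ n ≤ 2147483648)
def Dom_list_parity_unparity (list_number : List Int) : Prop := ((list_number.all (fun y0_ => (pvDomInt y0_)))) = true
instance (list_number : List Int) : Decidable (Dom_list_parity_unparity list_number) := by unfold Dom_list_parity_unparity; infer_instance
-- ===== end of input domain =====

-- B partitions by parity first and sorts each part (odds ascending, evens descending), instead of A's global sort + index-loop partition + reverse; objective: simpler.


-- ===== PORT A =====
def list_parity_unparity (list_number : List Int) : List Int :=
  let new_list := PySem.List.sorted list_number (fun x => x) false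
  let st := (PySem.List.pyRange 0 (PySem.List.len new_list) 1).foldl
    (fun (acc : List Int × List Int) go_list =>
      if PySem.Int.mod (PySem.List.pyGetD new_list go_list 0) 2 = 0 then
        (acc.1 ++ [PySem.List.pyGetD new_list go_list 0], acc.2)
      else if PySem.Int.mod (PySem.List.pyGetD new_list go_list 0) 2 ≠ 0 then
        (acc.1, acc.2 ++ [PySem.List.pyGetD new_list go_list 0])
      else acc)
    ([], [])
  st.2 ++ st.1.reverse

-- ===== PORT B =====
-- B: partition first, then sort each part (odds ascending, evens descending); simpler decomposition.
def list_parity_unparity_alt (list_number : List Int) : List Int :=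
  let odds := PySem.List.sorted (list_number.filter (fun x => decide (PySem.Int.mod x 2 ≠ 0))) (fun x => x) false
  let evens := PySem.List.sorted (list_number.filter (fun x => decide (PySem.Int.mod x 2 = 0))) (fun x => x) true
  odds ++ evens

-- ===== PRECONDITION & SPEC =====
def Spec_list_parity_unparity (list_number : List Int) (out : List Int) : Prop := out = list_parity_unparity_alt list_number
instance (list_number : List Int) (out : List Int) : Decidable (Spec_list_parity_unparity list_number out) := by unfold Spec_list_parity_unparity; infer_instance

-- ===== CLAIM (what is proved, stated in full; the proofs are below) =====
def Claim_equal_list_parity_unparity : Prop := ∀ (list_number : List Int), Dom_list_parity_unparity list_number → Spec_list_parity_unparity list_number (list_parity_unparity list_number)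

-- ===== LEMMAS AND PROOFS =====

-- A's loop accumulates the even and odd elements of l (in order) onto the accumulator pair.
theorem loopA_eq_filter (l : List Int) (p u : List Int) :
    l.foldl
      (fun (acc : List Int × List Int) v =>
        if PySem.Int.mod v 2 = 0 then (acc.1 ++ [v], acc.2)
        else if PySem.Int.mod v 2 ≠ 0 then (acc.1, acc.2 ++ [v])
        else acc)
      (p, u)
    = (p ++ l.filter (fun x => decide (PySem.Int.mod x 2 = 0)),
       u ++ l.filter (fun x => decide (PySem.Int.mod x 2 ≠ 0))) := by
  induction l generalizing p u with
  | nil => simp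
  | cons x t ih =>
    rw [List.foldl_cons]
    by_cases h : PySem.Int.mod x 2 = 0 <;>
      simp only [h, if_true, if_false, ne_eq, not_true_eq_false, not_false_eq_true, List.filter_cons, decide_true, decide_false, decide_not, Bool.not_true,
        Bool.not_false] <;> (rw [ih]; simp) <;>
      exact List.filter_congr (fun a _ => by by_cases hd : (2:Int) ∣ a <;> simp [hd] <;> omega)

-- sorting the odd part of xs = the odd part of sorted xs (identity key, so stability is free)
theorem sorted_filter (xs : List Int) (q : Int → Bool) :
    PySem.List.sorted (xs.filter q) (fun x => x) false
      = (PySem.List.sorted xs (fun x => x) false).filter q :=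
  PySem.List.sorted_id_eq_of_perm_of_pairwise _ _
    ((PySem.List.sorted_perm xs (fun x => x) false).filter q)
    ((PySem.List.sorted_pairwise xs (fun x => x)).sublist List.filter_sublist)

-- descending sort of the even part = reverse of the even part of the ascending sort
theorem sorted_rev_filter (xs : List Int) (q : Int → Bool) :
    PySem.List.sorted (xs.filter q) (fun x => x) true
      = ((PySem.List.sorted xs (fun x => x) false).filter q).reverse := by
  refine List.Perm.eq_of_pairwise (le := fun a b : Int => b ≤ a)
    (fun a b _ _ h1 h2 => le_antisymm h2 h1) ?_ ?_ ?_
  · exact PySem.List.sorted_pairwise_rev _ _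
  · exact List.pairwise_reverse.mpr
      ((PySem.List.sorted_pairwise xs (fun x => x)).sublist List.filter_sublist)
  · exact (PySem.List.sorted_perm _ _ _).trans
      ((((PySem.List.sorted_perm xs (fun x => x) false).filter q).symm).trans
        (List.reverse_perm _).symm)

-- ===== VERDICT (by name: the statement is the Claim_ definition above) =====
theorem list_parity_unparity_spec : Claim_equal_list_parity_unparity := by
  intro xs _
  unfold Spec_list_parity_unparity
  dsimp only [list_parity_unparity, list_parity_unparity_alt]
  rw [PySem.List.foldl_pyRange_zero_pyGetD (PySem.List.sorted xs (fun x => x) false) 0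
        (fun (acc : List Int × List Int) v =>
          if PySem.Int.mod v 2 = 0 then (acc.1 ++ [v], acc.2)
          else if PySem.Int.mod v 2 ≠ 0 then (acc.1, acc.2 ++ [v]) else acc) ([], [])]
  rw [loopA_eq_filter, sorted_filter, sorted_rev_filter]
  simp
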